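-- pv_equiv track=rewrite | github.com/lmj00/programmers | 프로그래머스/unrated/176963. 추억 점수/추억 점수.py | solution
-- ===== SOURCE A (Python) =====
-- def solution(name, yearning, photo):
--
--     result = []
--     dic = {}
--
--     for idx, n in enumerate(name):
--         if n not in dic:
--             dic[n] = yearning[idx]
--
--
--     for p in photo:
--         value = 0
--
--         for name in p:
--             if name in dic:
--                 value += dic[name]
--
--         result.append(value)
--
--     return result
-- ===== SOURCE B (Python) =====
-- def solution(name, yearning, photo):
--     pairs = []
--     seen = set()
--     for n, y in zip(name, yearning):
--         if n not in seen:
--             seen.add(n)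
--             pairs.append((n, y))
--     return [sum(y * p.count(n) for n, y in pairs) for p in photo]
-- ===== Notes on version B (the rewrite author's own statement) =====
-- stated objective: alternative
-- what changed: B swaps the loop nesting: instead of A's dict lookup per person in each photo, B builds the first-occurrence (name, yearning) pair list once from zip(name, yearning) and, for each photo, sums yearning * photo.count(name) over those pairs, counting occurrences instead of looking names up.
-- outside the precondition, e.g. on solution(['a', 'b'], [1], [['b']]): A raises IndexError, B returns [0]
import Mathlib
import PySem

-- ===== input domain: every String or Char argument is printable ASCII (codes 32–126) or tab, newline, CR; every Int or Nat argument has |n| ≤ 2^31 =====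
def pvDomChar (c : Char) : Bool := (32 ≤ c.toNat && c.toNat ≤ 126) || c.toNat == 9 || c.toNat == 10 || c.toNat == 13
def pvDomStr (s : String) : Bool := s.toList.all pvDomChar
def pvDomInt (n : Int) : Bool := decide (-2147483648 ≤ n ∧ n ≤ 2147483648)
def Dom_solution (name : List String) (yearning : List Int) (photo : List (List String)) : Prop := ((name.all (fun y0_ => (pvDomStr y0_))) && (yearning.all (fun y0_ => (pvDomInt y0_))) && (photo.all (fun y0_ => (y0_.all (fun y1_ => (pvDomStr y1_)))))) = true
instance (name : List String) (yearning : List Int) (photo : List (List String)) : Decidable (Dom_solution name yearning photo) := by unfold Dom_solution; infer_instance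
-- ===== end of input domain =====

-- B swaps the loop nesting: it builds the first-occurrence (name, yearning) pair list from
-- zip(name, yearning) and, per photo, sums y * p.count(n) over those pairs instead of A's
-- per-person dictionary lookups (objective: alternative).

-- ===== PORT A =====
-- the first loop of A: build the first-occurrence dictionary name -> yearning value
def solutionDic (name : List String) (yearning : List Int) : PySem.Dict String Int :=
  (PySem.List.enumerate name).foldl
    (fun d p =>
      if d.contains p.2 then d
      else d.insert p.2 ((PySem.List.pyGet? yearning p.1).getD 0))
    PySem.Dict.empty

def solution (name : List String) (yearning : List Int) (photo : List (List String)) : List Int :=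
  photo.foldl
    (fun result p =>
      result ++ [p.foldl
        (fun value nm =>
          if (solutionDic name yearning).contains nm
          then value + (solutionDic name yearning).getD nm 0 else value) 0])
    []

-- ===== PORT B =====
-- B's first loop: first-occurrence (name, yearning) pairs from zip, with a 'seen' set
def solutionPairs (name : List String) (yearning : List Int) : List (String × Int) :=
  ((name.zip yearning).foldl
    (fun (st : List (String × Int) × PySem.Set String) q =>
      if PySem.Set.contains st.2 q.1 then st
      else (st.1 ++ [q], PySem.Set.add st.2 q.1))
    ([], PySem.Set.empty)).1

def solution_alt (name : List String) (yearning : List Int) (photo : List (List String)) : List Int :=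
  photo.map (fun p =>
    ((solutionPairs name yearning).map
      (fun q => q.2 * (PySem.List.count p q.1 : Int))).sum)

-- ===== PRECONDITION & SPEC =====
-- Pre_ excludes exactly the inputs on which the Python A raises IndexError: some name whose
-- first occurrence lies at an index ≥ len(yearning), i.e. a name in the part of `name` beyond
-- `yearning`'s length that does not also occur in the part covered by `yearning`.
def Pre_solution (name : List String) (yearning : List Int) (_photo : List (List String)) : Prop :=
  ∀ nm ∈ name.drop yearning.length, nm ∈ name.take yearning.length
instance (name : List String) (yearning : List Int) (photo : List (List String)) : Decidable (Pre_solution name yearning photo) := by unfold Pre_solution; infer_instance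

def pvWitness_solution : List String × List Int × List (List String) :=
  (["a", "b"], [5, 7], [["a", "b"], ["c"], ["a", "a"]])

def Spec_solution (name : List String) (yearning : List Int) (photo : List (List String)) (out : List Int) : Prop := out = solution_alt name yearning photo
instance (name : List String) (yearning : List Int) (photo : List (List String)) (out : List Int) : Decidable (Spec_solution name yearning photo out) := by unfold Spec_solution; infer_instance

-- ===== CLAIM (what is proved, stated in full; the proofs are below) =====
def Claim_equal_solution : Prop := ∀ (name : List String) (yearning : List Int) (photo : List (List String)), Dom_solution name yearning photo → Pre_solution name yearning photo → Spec_solution name yearning photo (solution name yearning photo)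

-- ===== LEMMAS AND PROOFS =====

-- invariant of A's dictionary-building loop
lemma get?_foldl_enum (l : List String) (ys : List Int) (s : Int) (d : PySem.Dict String Int)
    (nm : String) :
    ((PySem.List.enumerate l s).foldl
        (fun d p =>
          if d.contains p.2 then d
          else d.insert p.2 ((PySem.List.pyGet? ys p.1).getD 0)) d).get? nm
      = (d.get? nm).or ((PySem.List.index? l nm).map
          (fun i => (PySem.List.pyGet? ys (s + (i : Int))).getD 0)) := by
  induction l generalizing s d with
  | nil => simp [PySem.List.enumerate_nil]
  | cons x l ih =>
    rw [PySem.List.enumerate_cons, List.foldl_cons, ih]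
    by_cases hx : nm = x
    · subst hx
      by_cases hc : d.contains nm
      · simp only [hc, if_true]
        rcases h : d.get? nm with _ | v
        · rw [PySem.Dict.contains_eq_isSome_get?, h] at hc; simp at hc
        · rw [PySem.List.index?_cons_self]
          simp
      · simp only [hc]
        have hnone : d.get? nm = none :=
          (PySem.Dict.get?_eq_none_iff_contains d nm).mpr (by simpa using hc)
        rw [PySem.List.index?_cons_self]
        simp [PySem.Dict.get?_insert_self, hnone]
    · have hne : x ≠ nm := fun h => hx h.symm
      have hidx : PySem.List.index? (x :: l) nm = (PySem.List.index? l nm).map (· + 1) :=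
        PySem.List.index?_cons_of_ne l hne
      have harith : ∀ i : Nat, s + 1 + (i : Int) = s + ((i : Int) + 1) := by
        intro i; ring
      by_cases hc : d.contains x
      · simp only [hc, if_true, hidx]
        rcases PySem.List.index? l nm with _ | i
        · simp
        · simp [harith i]
      · have hc' : d.contains x = false := by simpa using hc
        simp only [hc', Bool.false_eq_true, if_false, hidx]
        rw [PySem.Dict.get?_insert_of_ne d ((PySem.List.pyGet? ys s).getD 0) hx]
        rcases PySem.List.index? l nm with _ | i
        · simp
        · simp [harith i]

lemma get?_solutionDic (name : List String) (yearning : List Int) (nm : String) :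
    (solutionDic name yearning).get? nm
      = (PySem.List.index? name nm).map
          (fun i => (PySem.List.pyGet? yearning (i : Int)).getD 0) := by
  unfold solutionDic
  rw [get?_foldl_enum]
  simp [PySem.Dict.get?_empty]

lemma lookup_cons_eq (a nm : String) (b : Int) (l : List (String × Int)) :
    List.lookup nm ((a, b) :: l) = if a = nm then some b else List.lookup nm l := by
  by_cases h : a = nm
  · subst h; simp [List.lookup]
  · have hb : (nm == a) = false := beq_eq_false_iff_ne.mpr (fun e => h (Eq.symm e))
    simp [List.lookup, hb, h]

lemma lookup_isSome_iff_mem (k : String) (acc : List (String × Int)) :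
    (List.lookup k acc).isSome ↔ k ∈ acc.map Prod.fst := by
  induction acc with
  | nil => simp
  | cons q l ih =>
    cases q with
    | mk a b =>
      rw [lookup_cons_eq]
      by_cases h : a = k
      · subst h; simp
      · simp only [h, if_false, ih, List.map_cons, List.mem_cons]
        constructor
        · exact fun hm => Or.inr hm
        · rintro (he | hm)
          · exact absurd he.symm h
          · exact hm

lemma contains_add_eq (s : PySem.Set String) (x k : String) :
    PySem.Set.contains (PySem.Set.add s x) k = (PySem.Set.contains s k || (x == k)) := by
  have hb : ∀ m n : String, ¬ m = n → (m == n) = false :=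
    fun m n h => beq_eq_false_iff_ne.mpr h
  by_cases h : x ∈ s
  · have hadd : PySem.Set.add s x = s := by simp [PySem.Set.add, PySem.Set.contains, h]
    rw [hadd]
    by_cases hk : x = k
    · subst hk; simp [PySem.Set.contains, h]
    · simp [hb x k hk]
  · have hadd : PySem.Set.add s x = s ++ [x] := by simp [PySem.Set.add, PySem.Set.contains, h]
    rw [hadd]
    by_cases hk : x = k
    · subst hk; simp [PySem.Set.contains]
    · simp [PySem.Set.contains, hb x k hk]
      exact fun e => absurd e.symm hk

lemma foldl_pairs_inv (l : List (String × Int)) (acc : List (String × Int))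
    (s : PySem.Set String)
    (hs : ∀ k, PySem.Set.contains s k = (List.lookup k acc).isSome)
    (hnd : (acc.map Prod.fst).Nodup) :
    (∀ nm, List.lookup nm
        (l.foldl (fun (st : List (String × Int) × PySem.Set String) q =>
          if PySem.Set.contains st.2 q.1 then st
          else (st.1 ++ [q], PySem.Set.add st.2 q.1)) (acc, s)).1
      = (List.lookup nm acc).or (List.lookup nm l))
    ∧ (((l.foldl (fun (st : List (String × Int) × PySem.Set String) q =>
          if PySem.Set.contains st.2 q.1 then st
          else (st.1 ++ [q], PySem.Set.add st.2 q.1)) (acc, s)).1.map Prod.fst).Nodup) := by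
  induction l generalizing acc s with
  | nil => exact ⟨fun nm => by simp, hnd⟩
  | cons q l ih =>
    rw [List.foldl_cons]
    by_cases hc : PySem.Set.contains s q.1
    · simp only [hc, if_true]
      obtain ⟨h1, h2⟩ := ih acc s hs hnd
      refine ⟨fun nm => ?_, h2⟩
      rw [h1 nm]
      cases q with
      | mk a b =>
        rw [lookup_cons_eq]
        by_cases hq : a = nm
        · subst hq
          have hsome : (List.lookup a acc).isSome := by rw [← hs]; exact hc
          simp [Option.or_of_isSome hsome]
        · simp [hq]
    · simp only [hc, Bool.false_eq_true, if_false]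
      have hkeys : q.1 ∉ acc.map Prod.fst := by
        rw [← lookup_isSome_iff_mem]
        rw [← hs]
        simpa using hc
      have hs' : ∀ k, PySem.Set.contains (PySem.Set.add s q.1) k
          = (List.lookup k (acc ++ [q])).isSome := by
        intro k
        rw [contains_add_eq, hs, List.lookup_append]
        cases q with
        | mk a b =>
          by_cases hk : a = k
          · subst hk; simp
          · simp [lookup_cons_eq, hk]
      have hnd' : ((acc ++ [q]).map Prod.fst).Nodup := by
        simp only [List.map_append, List.map_cons, List.map_nil]
        exact List.Nodup.append hnd (List.nodup_singleton _) (by simpa using hkeys)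
      obtain ⟨h1, h2⟩ := ih (acc ++ [q]) (PySem.Set.add s q.1) hs' hnd'
      refine ⟨fun nm => ?_, h2⟩
      rw [h1 nm, List.lookup_append, Option.or_assoc]
      congr 1
      cases q with
      | mk a b =>
        rw [lookup_cons_eq, lookup_cons_eq]
        by_cases hk : a = nm <;> simp [hk]

lemma lookup_solutionPairs (name : List String) (yearning : List Int) (nm : String) :
    List.lookup nm (solutionPairs name yearning) = List.lookup nm (name.zip yearning) := by
  have h := foldl_pairs_inv (name.zip yearning) [] PySem.Set.empty
    (fun k => by simp [PySem.Set.contains, PySem.Set.empty]) (by simp)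
  unfold solutionPairs
  exact h.1 nm

lemma nodup_keys_solutionPairs (name : List String) (yearning : List Int) :
    ((solutionPairs name yearning).map Prod.fst).Nodup := by
  unfold solutionPairs
  exact (foldl_pairs_inv (name.zip yearning) [] PySem.Set.empty
    (fun k => by simp [PySem.Set.contains, PySem.Set.empty]) (by simp)).2

lemma lookup_zip_eq_index (name : List String) (yearning : List Int) (nm : String)
    (h : nm ∈ name.drop yearning.length → nm ∈ name.take yearning.length) :
    List.lookup nm (name.zip yearning)
      = (PySem.List.index? name nm).map
          (fun i => (PySem.List.pyGet? yearning (i : Int)).getD 0) := by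
  induction name generalizing yearning with
  | nil => simp [PySem.List.index?]
  | cons x xs ih =>
    cases yearning with
    | nil =>
      have hnm : nm ∉ x :: xs := fun hm => by simpa using h (by simpa using hm)
      rw [(PySem.List.index?_eq_none_iff _ _).mpr hnm]
      simp
    | cons y ys =>
      by_cases hx : x = nm
      · subst hx
        rw [PySem.List.index?_cons_self, List.zip_cons_cons, lookup_cons_eq]
        simp
      · rw [PySem.List.index?_cons_of_ne _ (fun e => hx e), List.zip_cons_cons,
          lookup_cons_eq]
        simp only [hx, if_false]
        have h' : nm ∈ xs.drop ys.length → nm ∈ xs.take ys.length := by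
          intro hd
          have := h (by simpa using hd)
          simp only [List.length_cons, List.take_succ_cons, List.mem_cons] at this
          rcases this with he | ht
          · exact absurd he.symm hx
          · exact ht
        rw [ih ys h']
        cases hidx : PySem.List.index? xs nm with
        | none => simp
        | some i =>
          have hcast : ((i + 1 : Nat) : Int) = (i : Int) + 1 := by push_cast; ring
          simp only [Option.map_some, Option.bind_some, Option.bind_eq_bind,
            Option.pure_def]
          rw [hcast, PySem.List.pyGet?_cons_succ]

lemma sum_ite_zero (pairs : List (String × Int)) (x : String)
    (hx : x ∉ pairs.map Prod.fst) :
    (pairs.map (fun q => if q.1 = x then q.2 else 0)).sum = 0 := by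
  induction pairs with
  | nil => simp
  | cons q rest ih =>
    simp only [List.map_cons, List.mem_cons, not_or] at hx ⊢
    rw [List.sum_cons, if_neg (fun e => hx.1 e.symm), ih hx.2, add_zero]

lemma sum_ite_eq_lookup (pairs : List (String × Int)) (x : String)
    (hnd : (pairs.map Prod.fst).Nodup) :
    (pairs.map (fun q => if q.1 = x then q.2 else 0)).sum
      = (List.lookup x pairs).getD 0 := by
  induction pairs with
  | nil => simp
  | cons q rest ih =>
    simp only [List.map_cons, List.nodup_cons] at hnd
    cases q with
    | mk a b =>
      rw [List.map_cons, List.sum_cons, lookup_cons_eq]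
      by_cases hq : a = x
      · subst hq
        rw [if_pos rfl, sum_ite_zero rest a hnd.1, add_zero]
        simp
      · rw [if_neg hq, if_neg hq, zero_add, ih hnd.2]

lemma sum_lookup_eq_sum_count (p : List String) (pairs : List (String × Int))
    (hnd : (pairs.map Prod.fst).Nodup) :
    (p.map (fun nm => (List.lookup nm pairs).getD 0)).sum
      = (pairs.map (fun q => q.2 * (List.count q.1 p : Int))).sum := by
  induction p with
  | nil => simp
  | cons x xs ih =>
    rw [List.map_cons, List.sum_cons, ih]
    have hcount : ∀ q : String × Int,
        q.2 * (List.count q.1 (x :: xs) : Int)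
          = (if q.1 = x then q.2 else 0) + q.2 * (List.count q.1 xs : Int) := by
      intro q
      rw [List.count_cons]
      by_cases hq : q.1 = x
      · simp [hq]; ring
      · have hb : (x == q.1) = false := beq_eq_false_iff_ne.mpr (fun e => hq e.symm)
        simp [hb, hq]
    calc (List.lookup x pairs).getD 0 + (pairs.map (fun q => q.2 * (List.count q.1 xs : Int))).sum
        = (pairs.map (fun q => if q.1 = x then q.2 else 0)).sum
            + (pairs.map (fun q => q.2 * (List.count q.1 xs : Int))).sum := by
          rw [sum_ite_eq_lookup pairs x hnd]
      _ = (pairs.map (fun q => (if q.1 = x then q.2 else 0) + q.2 * (List.count q.1 xs : Int))).sum := by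
          rw [← List.sum_map_add]
      _ = (pairs.map (fun q => q.2 * (List.count q.1 (x :: xs) : Int))).sum := by
          simp only [hcount]

-- ===== VERDICT (by name: the statement is the Claim_ definition above) =====
theorem solution_spec : Claim_equal_solution := by
  intro name yearning photo _ hpre
  unfold Spec_solution solution solution_alt
  rw [PySem.List.foldl_append_singleton_eq_map, List.nil_append]
  apply List.map_congr_left
  intro p _
  have hfun : (fun (value : Int) (nm : String) =>
      if (solutionDic name yearning).contains nm
      then value + (solutionDic name yearning).getD nm 0 else value)
      = fun (value : Int) (nm : String) =>
          value + ((solutionDic name yearning).get? nm).getD 0 := by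
    funext value nm
    by_cases hc : (solutionDic name yearning).contains nm
    · rw [if_pos hc, PySem.Dict.getD_eq_get?_getD]
    · have : (solutionDic name yearning).get? nm = none :=
        (PySem.Dict.get?_eq_none_iff_contains _ nm).mpr (by simpa using hc)
      rw [if_neg hc, this]
      simp
  rw [hfun, PySem.List.foldl_add, zero_add]
  have hval : ∀ nm : String, ((solutionDic name yearning).get? nm).getD 0
      = (List.lookup nm (solutionPairs name yearning)).getD 0 := by
    intro nm
    rw [get?_solutionDic, lookup_solutionPairs,
      lookup_zip_eq_index name yearning nm (fun hd => hpre nm hd)]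
  simp only [hval]
  rw [sum_lookup_eq_sum_count p _ (nodup_keys_solutionPairs name yearning)]
  simp [PySem.List.count_eq]
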